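-- pv_equiv track=rewrite | github.com/drasgo/NLPUtilities | nlpUtilities.py | input_vectorization
-- ===== SOURCE A (Python) =====
-- def input_vectorization(score_word: str, original_word="") -> list:
--     # Prepare vectorized words for separators score
--     vector = []
--
--     split_word = score_word.split(" ")
--     init = 0
--     final_phrase = ""
--     for index in range(len(original_word)):
--
--         if original_word[init:index].replace("_", "").replace("-", "").lower() == split_word[0]:
--             final_phrase = final_phrase + original_word[init:index] + " "
--             split_word.pop(0)
--             init = index
--
--         if len(split_word) == 1:
--             final_phrase = final_phrase + original_word[init:]
--             break
--
--     flag = True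
--     init = True
--     for character in final_phrase:
--         if flag is True:
--             if character == "_":
--                 vector.append(5)
--             elif character == "-":
--                 vector.append(6)
--             elif character.isupper():
--                 vector.append(7)
--                 vector.append(1)
--             else:
--                 if init is False:
--                     vector.append(9)
--                 else:
--                     init = False
--                 vector.append(1)
--             flag = False
--         else:
--             if character == "_":
--                 vector.append(2)
--
--             elif character == "-":
--                 vector.append(3)
--
--             elif character.isupper():
--                 vector.append(4)
--                 vector.append(1)
--
--             elif character == " ":
--                 flag = True
--
--             else:
--                 vector.append(1)
--
--     return vector
-- ===== SOURCE B (Python) =====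
-- def _head(ch, init):
--     # codes for the first character of a chunk, plus the updated 'init' flag
--     if ch == "_":
--         return [5], init
--     if ch == "-":
--         return [6], init
--     if ch.isupper():
--         return [7, 1], init
--     return ([1] if init else [9, 1]), False
--
--
-- def _tail(ch):
--     # codes for a non-leading, non-separator character
--     if ch == "_":
--         return [2]
--     if ch == "-":
--         return [3]
--     if ch.isupper():
--         return [4, 1]
--     return [1]
--
--
-- def input_vectorization(score_word: str, original_word="") -> list:
--     # Phase 1: rebuild the phrase, keeping the cleaned lowercase prefix
--     # incrementally instead of re-slicing/replacing at every index.
--     tokens = score_word.split(" ")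
--     parts = []
--     init = 0
--     cur = []  # cleaned ( '_'/'-' removed, lowered ) chars of original_word[init:index]
--     for index, ch in enumerate(original_word):
--         if len(cur) == len(tokens[0]) and "".join(cur) == tokens[0]:
--             parts.append(original_word[init:index])
--             parts.append(" ")
--             tokens.pop(0)
--             init = index
--             cur = []
--         if len(tokens) == 1:
--             parts.append(original_word[init:])
--             break
--         if ch != "_" and ch != "-":
--             cur.append(ch.lower())
--     final_phrase = "".join(parts)
--
--     # Phase 2: walk the phrase chunk by chunk (a chunk = head char + run up to
--     # the next separator space) instead of a per-character flag machine.
--     vector = []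
--     init = True
--     i = 0
--     n = len(final_phrase)
--     while i < n:
--         codes, init = _head(final_phrase[i], init)
--         vector += codes
--         j = final_phrase.find(" ", i + 1)
--         if j == -1:
--             j = n
--         for ch in final_phrase[i + 1:j]:
--             vector += _tail(ch)
--         i = j + 1
--     return vector
-- ===== Notes on version B (the rewrite author's own statement) =====
-- stated objective: alternative
-- what changed: Phase 1 maintains the cleaned lowercase prefix incrementally (one char per step) instead of re-slicing and re-running replace/replace/lower on a growing slice at every index, and phase 2 walks the phrase chunk-by-chunk (head char + run up to the next separator space) instead of a per-character boolean flag machine.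
import Mathlib
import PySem

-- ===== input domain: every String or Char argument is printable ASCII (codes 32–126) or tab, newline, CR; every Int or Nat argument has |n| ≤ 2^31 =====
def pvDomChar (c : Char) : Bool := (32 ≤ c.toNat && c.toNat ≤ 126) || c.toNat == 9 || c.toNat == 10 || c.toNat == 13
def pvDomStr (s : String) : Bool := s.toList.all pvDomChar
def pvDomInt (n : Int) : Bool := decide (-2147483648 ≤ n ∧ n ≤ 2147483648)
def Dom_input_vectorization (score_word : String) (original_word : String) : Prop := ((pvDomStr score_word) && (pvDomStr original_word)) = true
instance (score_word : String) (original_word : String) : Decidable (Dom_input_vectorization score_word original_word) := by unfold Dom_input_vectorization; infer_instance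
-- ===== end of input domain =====

-- B re-implements A differently: the cleaned lowercase prefix is maintained incrementally
-- (instead of re-slicing + replace/replace/lower each index) and phase 2 is chunked
-- instead of a per-character flag machine.

-- ===== PORT A =====

-- original_word[init:index].replace("_","").replace("-","").lower()
def ivCleanA (l : List Char) : List Char :=
  PySem.Chars.lower (PySem.Chars.replace (PySem.Chars.replace l ['_'] []) ['-'] [])

-- the first loop of A (index over range(len(original_word)), with its break);
-- split_word[0] on an empty list is Python's IndexError — excluded by Pre_ (headD [] there)
def ivLoopA (ow : List Char) (sw : List (List Char)) (init : Nat) (fp : List Char)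
    (index : Nat) : List Char :=
  if h : index < ow.length then
    let s := PySem.List.slice ow (some (init : Int)) (some (index : Int))
    let st := if ivCleanA s = sw.headD []
              then (sw.tail, index, fp ++ s ++ [' '])
              else (sw, init, fp)
    if st.1.length = 1 then st.2.2 ++ PySem.List.slice ow (some ((st.2.1 : Nat) : Int)) none
    else ivLoopA ow st.1 st.2.1 st.2.2 (index + 1)
  else fp
termination_by ow.length - index

-- the second loop of A: per-character state machine over (flag, init, vector)
def ivPhase2A (l : List Char) (flag : Bool) (ini : Bool) (v : List Int) : List Int :=
  match l with
  | [] => v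
  | c :: rest =>
    if flag then
      if c = '_' then ivPhase2A rest false ini (v ++ [5])
      else if c = '-' then ivPhase2A rest false ini (v ++ [6])
      else if PySem.Chars.isupper c then ivPhase2A rest false ini (v ++ [7, 1])
      else if ini then ivPhase2A rest false false (v ++ [1])
      else ivPhase2A rest false false (v ++ [9, 1])
    else
      if c = '_' then ivPhase2A rest false ini (v ++ [2])
      else if c = '-' then ivPhase2A rest false ini (v ++ [3])
      else if PySem.Chars.isupper c then ivPhase2A rest false ini (v ++ [4, 1])
      else if c = ' ' then ivPhase2A rest true ini v
      else ivPhase2A rest false ini (v ++ [1])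

def input_vectorization (score_word : String) (original_word : String) : List Int :=
  let sw := PySem.Chars.splitOn score_word.toList [' ']
  ivPhase2A (ivLoopA original_word.toList sw 0 [] 0) true true []

-- ===== PORT B =====

def ivHeadB (c : Char) (ini : Bool) : List Int × Bool :=
  if c = '_' then ([5], ini)
  else if c = '-' then ([6], ini)
  else if PySem.Chars.isupper c then ([7, 1], ini)
  else ((if ini then [1] else [9, 1]), false)

def ivTailB (c : Char) : List Int :=
  if c = '_' then [2]
  else if c = '-' then [3]
  else if PySem.Chars.isupper c then [4, 1]
  else [1]

-- Source B phase 1: cur is the cleaned lowercase of original_word[init:index], kept incrementally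
def ivLoopB (ow : List Char) (tokens : List (List Char)) (init : Nat) (parts : List Char)
    (cur : List Char) (index : Nat) : List Char :=
  if h : index < ow.length then
    let c := ow[index]
    let st := if cur.length = (tokens.headD []).length ∧ cur = tokens.headD []
              then (tokens.tail, index, parts ++ (ow.drop init).take (index - init) ++ [' '],
                    ([] : List Char))
              else (tokens, init, parts, cur)
    if st.1.length = 1 then st.2.2.1 ++ ow.drop st.2.1
    else ivLoopB ow st.1 st.2.1 st.2.2.1
           (if c ≠ '_' ∧ c ≠ '-' then st.2.2.2 ++ [PySem.Chars.lowerChar c] else st.2.2.2)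
           (index + 1)
  else parts
termination_by ow.length - index

-- not-a-separator-space test used by the chunked walk
def ivNotSp (d : Char) : Bool := d != ' '

-- Source B phase 2: 'find(" ", i+1)' + slice ported as the first-space split of the remainder (exact)
def ivPhase2B (l : List Char) (ini : Bool) : List Int :=
  match l with
  | [] => []
  | c :: rest =>
    let h := ivHeadB c ini
    h.1 ++ (rest.takeWhile ivNotSp).flatMap ivTailB
        ++ ivPhase2B ((rest.dropWhile ivNotSp).tail) h.2
termination_by l.length
decreasing_by
  have h1 : (rest.dropWhile ivNotSp).length ≤ rest.length :=
    List.length_dropWhile_le _ _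
  simp only [List.length_tail, List.length_cons]
  omega

def input_vectorization_alt (score_word : String) (original_word : String) : List Int :=
  let tokens := PySem.Chars.splitOn score_word.toList [' ']
  ivPhase2B (ivLoopB original_word.toList tokens 0 [] [] 0) true

-- ===== PRECONDITION & SPEC =====
-- A raises IndexError (split_word[0] on an emptied list) exactly when score_word = "" and
-- original_word has at least 2 characters; B raises there too; Pre_ excludes only those inputs.
def Pre_input_vectorization (score_word : String) (original_word : String) : Prop :=
  ¬ (score_word = "" ∧ 2 ≤ original_word.length)
instance (score_word : String) (original_word : String) :
    Decidable (Pre_input_vectorization score_word original_word) := by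
  unfold Pre_input_vectorization; infer_instance

def pvWitness_input_vectorization : String × String := ("ab c", "Ab_c")

def Spec_input_vectorization (score_word : String) (original_word : String) (out : List Int) :
    Prop := out = input_vectorization_alt score_word original_word
instance (score_word : String) (original_word : String) (out : List Int) :
    Decidable (Spec_input_vectorization score_word original_word out) := by
  unfold Spec_input_vectorization; infer_instance

-- ===== CLAIM (what is proved, stated in full; the proofs are below) =====
def Claim_equal_input_vectorization : Prop := ∀ (score_word : String) (original_word : String), Dom_input_vectorization score_word original_word → Pre_input_vectorization score_word original_word → Spec_input_vectorization score_word original_word (input_vectorization score_word original_word)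

-- ===== LEMMAS AND PROOFS =====

-- replace with a one-char pattern and empty replacement is a filter
theorem replaceGo_single (d : Char) :
    ∀ (l acc : List Char) (fuel : Nat), l.length ≤ fuel →
    PySem.Chars.replace.go [d] [] fuel l acc = acc.reverse ++ l.filter (fun c => c != d) := by
  intro l
  induction l with
  | nil =>
    intro acc fuel _
    cases fuel <;> simp [PySem.Chars.replace.go]
  | cons c t ih =>
    intro acc fuel hf
    cases fuel with
    | zero => simp at hf
    | succ f =>
      simp only [PySem.Chars.replace.go]
      by_cases hc : d = c
      · subst hc
        simp only [List.isPrefixOf, beq_self_eq_true, Bool.true_and, if_true,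
          List.length_cons, List.length_nil, List.drop_succ_cons, List.drop_zero,
          List.reverse_nil, List.nil_append]
        rw [ih acc f (by simpa using hf)]
        simp
      · have hpre : ([d].isPrefixOf (c :: t)) = false := by
          simp [List.isPrefixOf, beq_eq_false_iff_ne, hc]
        rw [hpre]
        simp only [Bool.false_eq_true, if_false]
        rw [ih (c :: acc) f (by simpa using hf)]
        have : (c != d) = true := by simp [bne_iff_ne]; exact fun h => hc h.symm
        simp [this]

theorem replace_single (d : Char) (l : List Char) :
    PySem.Chars.replace l [d] [] = l.filter (fun c => c != d) := by
  rw [PySem.Chars.replace]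
  simp only [List.isEmpty_cons, Bool.false_eq_true, if_false]
  exact replaceGo_single d l [] l.length le_rfl

-- the A-side cleaning is filter-then-map
theorem ivCleanA_eq (l : List Char) :
    ivCleanA l = (l.filter (fun c => c != '_' && c != '-')).map PySem.Chars.lowerChar := by
  rw [ivCleanA, replace_single, replace_single, PySem.Chars.lower, List.filter_filter]
  congr 1
  exact List.filter_congr (fun a _ => Bool.and_comm _ _)

theorem ivCleanA_nil : ivCleanA [] = [] := by simp [ivCleanA_eq]

-- extending the cleaned prefix by one source character
theorem ivCleanA_snoc (l : List Char) (c : Char) :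
    ivCleanA (l ++ [c]) =
      ivCleanA l ++ (if c ≠ '_' ∧ c ≠ '-' then [PySem.Chars.lowerChar c] else []) := by
  simp only [ivCleanA_eq, List.filter_append, List.map_append]
  congr 1
  by_cases h1 : c = '_'
  · simp [List.filter_cons, h1]
  · by_cases h2 : c = '-'
    · simp [List.filter_cons, h1, h2]
    · have hb : (c != '_' && c != '-') = true := by simp [bne_iff_ne, h1, h2]
      simp [List.filter_cons, hb, h1, h2]

-- the two guards coincide
theorem guard_iff (cur t : List Char) :
    (cur.length = t.length ∧ cur = t) ↔ cur = t := by
  constructor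
  · exact fun h => h.2
  · exact fun h => ⟨by rw [h], h⟩

-- phase 1: B's incremental loop equals A's slicing loop
theorem loop_eq (ow : List Char) :
    ∀ (n index : Nat) (sw : List (List Char)) (init : Nat) (fp : List Char),
      ow.length - index ≤ n → init ≤ index →
      ivLoopB ow sw init fp (ivCleanA ((ow.drop init).take (index - init))) index =
        ivLoopA ow sw init fp index := by
  intro n
  induction n with
  | zero =>
    intro index sw init fp hn _
    rw [ivLoopA, ivLoopB]
    have : ¬ index < ow.length := by omega
    simp [this]
  | succ m ih =>
    intro index sw init fp hn hinit
    rw [ivLoopA, ivLoopB]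
    by_cases h : index < ow.length
    · simp only [h, dif_pos]
      have hslice : PySem.List.slice ow (some (init : Int)) (some (index : Int)) =
          (ow.drop init).take (index - init) := PySem.List.slice_natCast ow init index
      have hguard : (((ivCleanA ((ow.drop init).take (index - init))).length =
            (sw.headD []).length ∧
            ivCleanA ((ow.drop init).take (index - init)) = sw.headD []) ↔
          ivCleanA (PySem.List.slice ow (some (init : Int)) (some (index : Int))) =
            sw.headD []) := by
        rw [hslice]; exact guard_iff _ _
      have hstep : ∀ (init' : Nat), init' ≤ index →
          (if ow[index] ≠ '_' ∧ ow[index] ≠ '-'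
           then ivCleanA ((ow.drop init').take (index - init')) ++
                  [PySem.Chars.lowerChar ow[index]]
           else ivCleanA ((ow.drop init').take (index - init'))) =
          ivCleanA ((ow.drop init').take (index + 1 - init')) := by
        intro init' hle
        have htake : (ow.drop init').take (index + 1 - init') =
            (ow.drop init').take (index - init') ++ [ow[index]] := by
          have h1 : index + 1 - init' = (index - init') + 1 := by omega
          rw [h1, List.take_add_one]
          congr 1
          rw [List.getElem?_drop]
          have h3 : init' + (index - init') = index := by omega
          rw [h3, List.getElem?_eq_getElem h]
          rfl
        rw [htake, ivCleanA_snoc]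
        split_ifs <;> simp
      by_cases hm : ivCleanA (PySem.List.slice ow (some (init : Int)) (some (index : Int))) =
          sw.headD []
      · rw [if_pos (hguard.mpr hm), if_pos hm]
        simp only
        by_cases hlen : sw.tail.length = 1
        · simp only [hlen, if_pos rfl, if_true, hslice]
          rw [PySem.List.slice_from_natCast]
        · rw [if_neg hlen, if_neg hlen]
          have := ih (index + 1) sw.tail index
            (fp ++ PySem.List.slice ow (some (init : Int)) (some (index : Int)) ++ [' '])
            (by omega) (by omega)
          rw [← this, hslice]
          congr 1
          rw [← hstep index le_rfl]
          simp [ivCleanA_nil]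
      · rw [if_neg (fun hc => hm (hguard.mp hc)), if_neg hm]
        simp only
        by_cases hlen : sw.length = 1
        · simp only [hlen, if_pos rfl, if_true]
          rw [PySem.List.slice_from_natCast]
        · rw [if_neg hlen, if_neg hlen]
          have := ih (index + 1) sw init
            (fp) (by omega) (by omega)
          rw [← this]
          congr 1
          exact hstep init hinit
    · simp [h]

-- phase 2, flag = False: the machine consumes a run of tail characters up to a space
theorem phase2A_false :
    ∀ (l : List Char) (ini : Bool) (v : List Int),
      ivPhase2A l false ini v =
        ivPhase2A ((l.dropWhile ivNotSp).tail) true ini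
          (v ++ (l.takeWhile ivNotSp).flatMap ivTailB) := by
  intro l
  induction l with
  | nil => intro ini v; simp [ivPhase2A]
  | cons c rest ih =>
    intro ini v
    by_cases hsp : c = ' '
    · subst hsp
      have hnot : ivNotSp ' ' = false := by decide
      have hup : PySem.Chars.isupper ' ' = false := by decide
      simp [ivPhase2A, List.takeWhile_cons, List.dropWhile_cons, hnot, hup]
    · have hnot : ivNotSp c = true := by simp [ivNotSp, bne_iff_ne, hsp]
      rw [List.takeWhile_cons, List.dropWhile_cons]
      simp only [hnot, if_true, List.flatMap_cons]
      by_cases h1 : c = '_'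
      · have e : ivTailB c = [2] := by simp [ivTailB, h1]
        simp only [ivPhase2A, if_pos h1, Bool.false_eq_true, if_false, e]
        rw [ih]
        simp [List.append_assoc]
      · by_cases h2 : c = '-'
        · have e : ivTailB c = [3] := by simp [ivTailB, h1, h2]
          simp only [ivPhase2A, if_neg h1, if_pos h2, Bool.false_eq_true, if_false, e]
          rw [ih]
          simp [List.append_assoc]
        · by_cases h3 : PySem.Chars.isupper c
          · have e : ivTailB c = [4, 1] := by simp [ivTailB, h1, h2, h3]
            simp only [ivPhase2A, if_neg h1, if_neg h2, if_pos h3, Bool.false_eq_true,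
              if_false, e]
            rw [ih]
            simp [List.append_assoc]
          · have e : ivTailB c = [1] := by simp [ivTailB, h1, h2, h3]
            simp only [ivPhase2A, if_neg h1, if_neg h2, if_neg h3, if_neg hsp,
              Bool.false_eq_true, if_false, e]
            rw [ih]
            simp [List.append_assoc]

-- phase 2: A's machine started with flag = True equals B's chunked walk
theorem phase2_eq :
    ∀ (n : Nat) (l : List Char), l.length ≤ n → ∀ (ini : Bool) (v : List Int),
      ivPhase2A l true ini v = v ++ ivPhase2B l ini := by
  intro n
  induction n with
  | zero =>
    intro l hl ini v
    have : l = [] := List.length_eq_zero_iff.mp (by omega)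
    subst this; simp [ivPhase2A, ivPhase2B]
  | succ m ih =>
    intro l hl ini v
    cases l with
    | nil => simp [ivPhase2A, ivPhase2B]
    | cons c rest =>
      have hlen : ((rest.dropWhile ivNotSp).tail).length ≤ m := by
        have h1 : (rest.dropWhile ivNotSp).length ≤ rest.length :=
          List.length_dropWhile_le _ _
        simp only [List.length_tail]
        simp only [List.length_cons] at hl
        omega
      have hrec : ∀ (ini' : Bool) (w : List Int),
          ivPhase2A rest false ini' w =
            w ++ ((rest.takeWhile ivNotSp).flatMap ivTailB ++
              ivPhase2B ((rest.dropWhile ivNotSp).tail) ini') := by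
        intro ini' w
        rw [phase2A_false, ih _ hlen]
        simp [List.append_assoc]
      by_cases h1 : c = '_'
      · have e : ivHeadB c ini = ([5], ini) := by simp [ivHeadB, h1]
        simp only [ivPhase2A, ivPhase2B, if_pos h1, e, eq_self_iff_true, if_true]
        rw [hrec]
        simp [List.append_assoc]
      · by_cases h2 : c = '-'
        · have e : ivHeadB c ini = ([6], ini) := by simp [ivHeadB, h1, h2]
          simp only [ivPhase2A, ivPhase2B, if_neg h1, if_pos h2, e, eq_self_iff_true, if_true]
          rw [hrec]
          simp [List.append_assoc]
        · by_cases h3 : PySem.Chars.isupper c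
          · have e : ivHeadB c ini = ([7, 1], ini) := by simp [ivHeadB, h1, h2, h3]
            simp only [ivPhase2A, ivPhase2B, if_neg h1, if_neg h2, if_pos h3, e,
              eq_self_iff_true, if_true]
            rw [hrec]
            simp [List.append_assoc]
          · cases ini with
            | true =>
              have e : ivHeadB c true = ([1], false) := by simp [ivHeadB, h1, h2, h3]
              simp only [ivPhase2A, ivPhase2B, if_neg h1, if_neg h2, if_neg h3, e,
                eq_self_iff_true, if_true]
              rw [hrec]
              simp [List.append_assoc]
            | false =>
              have e : ivHeadB c false = ([9, 1], false) := by simp [ivHeadB, h1, h2, h3]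
              simp only [ivPhase2A, ivPhase2B, if_neg h1, if_neg h2, if_neg h3, e,
                Bool.false_eq_true, if_false, eq_self_iff_true, if_true]
              rw [hrec]
              simp [List.append_assoc]

-- ===== VERDICT (by name: the statement is the Claim_ definition above) =====
theorem input_vectorization_spec : Claim_equal_input_vectorization := by
  unfold Claim_equal_input_vectorization
  intro score_word original_word _ _
  unfold Spec_input_vectorization input_vectorization input_vectorization_alt
  simp only
  have hloop := loop_eq original_word.toList original_word.toList.length 0
    (PySem.Chars.splitOn score_word.toList [' ']) 0 [] (by omega) (by omega)
  simp only [Nat.sub_zero, List.take_zero, ivCleanA_nil, List.drop_zero] at hloop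
  rw [← hloop]
  rw [phase2_eq (ivLoopB original_word.toList (PySem.Chars.splitOn score_word.toList [' '])
      0 [] [] 0).length _ le_rfl]
  simp
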